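-- pv_equiv track=rewrite | github.com/strbckr/bwb-muthr | scripts/chat.py | process_markdown
-- ===== SOURCE A (Python) =====
-- def process_markdown(text):
--     output = []
--     in_code_block = False
--     for line in text.split('\n'):
--         stripped = line.strip()
--         if stripped.startswith('```'):
--             in_code_block = not in_code_block
--             continue
--         style = "code" if in_code_block else "normal"
--         if not stripped:
--             output.append(("", style))
--         else:
--             output.append((line, style))
--     return output
-- ===== SOURCE B (Python) =====
-- def process_markdown(text):
--     lines = text.split('\n')
--     fences = [line.strip().startswith('```') for line in lines]
--     counts = []  # counts[i] = number of fence lines strictly before line i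
--     c = 0
--     for f in fences:
--         counts.append(c)
--         c += f
--     return [("" if not line.strip() else line,
--              "code" if counts[i] % 2 else "normal")
--             for i, line in enumerate(lines) if not fences[i]]
-- ===== Notes on version B (the rewrite author's own statement) =====
-- stated objective: alternative
-- what changed: Replaces the fused toggle-and-emit loop by three passes: a fence-flag list, a prefix-count list giving each line's code state by parity of preceding fences, and a comprehension emitting (value, style) for non-fence lines.
import Mathlib
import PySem

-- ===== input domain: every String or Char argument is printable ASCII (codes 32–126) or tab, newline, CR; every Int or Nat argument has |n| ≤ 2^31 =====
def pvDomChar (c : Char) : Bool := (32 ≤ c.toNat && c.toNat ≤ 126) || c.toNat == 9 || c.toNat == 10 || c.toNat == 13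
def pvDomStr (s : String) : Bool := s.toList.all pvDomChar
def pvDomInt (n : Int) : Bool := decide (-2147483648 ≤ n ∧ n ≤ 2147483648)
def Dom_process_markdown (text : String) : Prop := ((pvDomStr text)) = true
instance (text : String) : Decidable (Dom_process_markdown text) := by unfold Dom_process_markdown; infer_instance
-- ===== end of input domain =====

-- B replaces A's fused toggle-and-emit loop by three passes (fence flags, prefix fence counts,
-- then an emit pass keyed by count parity); same values, no speed claim.

-- ===== PORT A =====
def pmStep (st : List (String × String) × Bool) (line : String) :
    List (String × String) × Bool :=
  let stripped := PySem.Str.strip line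
  if PySem.Str.startswith stripped "```" then (st.1, !st.2)
  else
    let style := if st.2 then "code" else "normal"
    if stripped = "" then (st.1 ++ [("", style)], st.2)
    else (st.1 ++ [(line, style)], st.2)

def process_markdown (text : String) : List (String × String) :=
  (((PySem.Str.split? text "\n").getD []).foldl pmStep ([], false)).1

-- ===== PORT B =====
-- fences = [line.strip().startswith('```') for line in lines]
def pmFence (line : String) : Bool :=
  PySem.Str.startswith (PySem.Str.strip line) "```"

-- counts[i] = number of fence lines strictly before line i (the c-accumulating loop of Source B)
def pmCounts : List Bool → Int → List Int
  | [], _ => []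
  | f :: rest, c => c :: pmCounts rest (c + (if f then 1 else 0))

-- the comprehension body: skip fence lines, emit (value, style by parity of counts[i])
def pmBody (fences : List Bool) (counts : List Int) (p : Int × String) :
    Option (String × String) :=
  if fences.getD p.1.toNat false then none
  else some ((if PySem.Str.strip p.2 = "" then "" else p.2),
             if (counts.getD p.1.toNat 0) % 2 ≠ 0 then "code" else "normal")

def process_markdown_alt (text : String) : List (String × String) :=
  let lines := (PySem.Str.split? text "\n").getD []
  let fences := lines.map pmFence
  let counts := pmCounts fences 0
  (PySem.List.enumerate lines).filterMap (pmBody fences counts)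

-- ===== PRECONDITION & SPEC =====
def Spec_process_markdown (text : String) (out : List (String × String)) : Prop := out = process_markdown_alt text
instance (text : String) (out : List (String × String)) : Decidable (Spec_process_markdown text out) := by unfold Spec_process_markdown; infer_instance

-- ===== CLAIM (what is proved, stated in full; the proofs are below) =====
def Claim_equal_process_markdown : Prop := ∀ (text : String), Dom_process_markdown text → Spec_process_markdown text (process_markdown text)

-- ===== LEMMAS AND PROOFS =====

-- reference recursion: A's loop without the accumulator
def pmRec : List String → Bool → List (String × String)
  | [], _ => []
  | l :: rest, b =>
    if pmFence l then pmRec rest (!b)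
    else (if PySem.Str.strip l = "" then "" else l, if b then "code" else "normal")
        :: pmRec rest b

theorem pm_foldl_eq (ls : List String) (acc : List (String × String)) (b : Bool) :
    (ls.foldl pmStep (acc, b)).1 = acc ++ pmRec ls b := by
  induction ls generalizing acc b with
  | nil => simp [pmRec]
  | cons l rest ih =>
    rw [List.foldl_cons]
    by_cases hf : pmFence l
    · have : pmStep (acc, b) l = (acc, !b) := by
        simp [pmStep, pmFence] at hf ⊢; simp [hf]
      rw [this, ih, pmRec]
      simp [hf]
    · by_cases he : PySem.Str.strip l = ""
      · have : pmStep (acc, b) l = (acc ++ [("", if b then "code" else "normal")], b) := by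
          simp [pmStep, pmFence] at hf ⊢; simp [hf, he]
        rw [this, ih, pmRec]
        simp [hf, he]
      · have : pmStep (acc, b) l = (acc ++ [(l, if b then "code" else "normal")], b) := by
          simp [pmStep, pmFence] at hf he ⊢; simp [hf, he]
        rw [this, ih, pmRec]
        simp [hf, he]

theorem pm_enumerate_shift {α β : Type} (body : Int × α → Option β) (xs : List α) (s : Int) :
    (PySem.List.enumerate xs (s + 1)).filterMap body
      = (PySem.List.enumerate xs s).filterMap (fun p => body (p.1 + 1, p.2)) := by
  induction xs generalizing s with
  | nil => simp [PySem.List.enumerate_nil]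
  | cons x xs ih =>
    simp [PySem.List.enumerate_cons, List.filterMap_cons]
    have := ih (s + 1)
    cases body (s + 1, x) <;> simp_all [add_comm, add_left_comm]

theorem pm_parity_flip (c : Int) (_hc : 0 ≤ c) :
    (decide ((c + 1) % 2 = 1)) = !(decide (c % 2 = 1)) := by
  by_cases h : c % 2 = 1
  · rw [show (c + 1) % 2 = 0 by omega]; simp [h]
  · rw [show (c + 1) % 2 = 1 by omega]; simp [h]

theorem pm_core (ls : List String) (c : Int) (hc : 0 ≤ c) :
    (PySem.List.enumerate ls).filterMap
        (pmBody (ls.map pmFence) (pmCounts (ls.map pmFence) c))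
      = pmRec ls (decide (c % 2 ≠ 0)) := by
  induction ls generalizing c with
  | nil => simp [PySem.List.enumerate_nil, pmRec]
  | cons l rest ih =>
    have hshift := pm_enumerate_shift
      (pmBody (pmFence l :: rest.map pmFence)
        (pmCounts (pmFence l :: rest.map pmFence) c)) rest 0
    have hcong :
        (PySem.List.enumerate rest 0).filterMap
            (fun p => pmBody (pmFence l :: rest.map pmFence)
              (pmCounts (pmFence l :: rest.map pmFence) c) (p.1 + 1, p.2))
          = (PySem.List.enumerate rest 0).filterMap
            (pmBody (rest.map pmFence)
              (pmCounts (rest.map pmFence) (c + (if pmFence l then 1 else 0)))) := by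
      apply List.filterMap_congr
      intro p hp
      obtain ⟨k, hk, rfl⟩ := (PySem.List.mem_enumerate_iff rest 0 p).1 hp
      have h1 : ((0 : Int) + k + 1).toNat = ((0 : Int) + k).toNat + 1 := by omega
      simp [pmBody, pmCounts, h1]
    by_cases hf : pmFence l
    · have h0 : pmBody (pmFence l :: rest.map pmFence)
          (pmCounts (pmFence l :: rest.map pmFence) c) (0, l) = none := by
        simp [pmBody, pmCounts, hf]
      simp only [List.map_cons] at *
      rw [show (PySem.List.enumerate (l :: rest) 0)
            = (0, l) :: PySem.List.enumerate rest (0 + 1) from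
          PySem.List.enumerate_cons l rest 0]
      rw [List.filterMap_cons, h0, hshift, hcong]
      simp only [hf, if_true]
      rw [ih (c + 1) (by omega)]
      simp [pmRec, hf, pm_parity_flip c hc]
    · have h0 : pmBody (pmFence l :: rest.map pmFence)
          (pmCounts (pmFence l :: rest.map pmFence) c) (0, l)
          = some ((if PySem.Str.strip l = "" then "" else l),
                  if c % 2 ≠ 0 then "code" else "normal") := by
        simp [pmBody, pmCounts, hf]
      simp only [List.map_cons] at *
      rw [show (PySem.List.enumerate (l :: rest) 0)
            = (0, l) :: PySem.List.enumerate rest (0 + 1) from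
          PySem.List.enumerate_cons l rest 0]
      rw [List.filterMap_cons, h0, hshift, hcong]
      simp only [hf, Bool.false_eq_true, if_false, add_zero]
      rw [ih c hc]
      simp [pmRec, hf]

-- ===== VERDICT (by name: the statement is the Claim_ definition above) =====
theorem process_markdown_spec : Claim_equal_process_markdown := by
  intro text _
  unfold Spec_process_markdown process_markdown process_markdown_alt
  rw [pm_foldl_eq, pm_core _ 0 (by omega)]
  simp
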